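-- pv_equiv track=rewrite | github.com/Mrcsrobles/Nonograma | Nonograma.py | ComprobarCol
-- ===== SOURCE A (Python) =====
-- def ComprobarCol(T, c, data):  # Esta función comprueba si una columna es solución
--     sum = 0
--     iniciado = False
--     acabado = False
--     for i in range(0, len(T)):
--         val = T[i][c]
--         if val == 0 and iniciado:
--             acabado = True
--         elif val == 1 and acabado:
--             return False  # la única restricción es que haya un 0 entre dos 1
--         elif val == 1:
--             sum += val
--             iniciado = True
--     return sum == data["cols"][c]  # Se devuelve True si el número de 1 es igual al indicado por la columna
-- ===== SOURCE B (Python) =====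
-- def ComprobarCol(T, c, data):
--     # Group-the-runs re-implementation: build the column, keep only 0/1 cells,
--     # collapse consecutive duplicates into runs, then judge the runs.
--     col = [row[c] for row in T]
--     filtered = [v for v in col if v == 0 or v == 1]
--     runs = []
--     for v in filtered:
--         if not runs or runs[-1] != v:
--             runs.append(v)
--     if runs.count(1) > 1:
--         return False
--     return filtered.count(1) == data["cols"][c]
-- ===== Notes on version B (the rewrite author's own statement) =====
-- stated objective: alternative
-- what changed: Replaces A's incremental flag-tracking state machine (sum/iniciado/acabado with early return) by a declarative pipeline: build the column, filter it to 0/1 cells, collapse consecutive duplicates into runs, reject if more than one run of 1s, else compare the count of 1s with the constraint.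
-- outside the precondition, e.g. on ComprobarCol([[1], [0], [1]], 0, {}): A returns False, B returns False
import Mathlib
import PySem

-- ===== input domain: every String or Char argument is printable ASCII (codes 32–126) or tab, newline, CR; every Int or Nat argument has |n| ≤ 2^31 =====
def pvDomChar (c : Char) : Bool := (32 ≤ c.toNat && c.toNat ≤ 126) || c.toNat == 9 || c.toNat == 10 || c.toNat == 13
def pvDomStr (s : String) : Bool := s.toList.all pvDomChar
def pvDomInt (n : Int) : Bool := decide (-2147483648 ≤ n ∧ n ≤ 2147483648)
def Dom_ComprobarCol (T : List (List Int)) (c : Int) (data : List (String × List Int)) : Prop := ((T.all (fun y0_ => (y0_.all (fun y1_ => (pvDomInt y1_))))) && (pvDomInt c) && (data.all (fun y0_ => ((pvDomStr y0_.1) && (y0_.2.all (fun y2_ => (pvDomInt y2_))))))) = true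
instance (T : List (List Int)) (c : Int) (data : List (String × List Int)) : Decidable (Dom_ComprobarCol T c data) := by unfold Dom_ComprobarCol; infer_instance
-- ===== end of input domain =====

-- B replaces A's flag-tracking state machine by a filter / collapse-runs / count pipeline
-- (alternative decomposition, same O(n) cost; return-value equivalence on Pre_).


-- data["cols"][c] (shared by both ports: both Pythons end with this very lookup);
-- none = the lookup would raise (KeyError / IndexError), excluded by Pre_.
def pvColsAt (c : Int) (data : List (String × List Int)) : Option Int :=
  ((PySem.Dict.mk data).get? "cols").bind (fun l => PySem.List.pyGet? l c)

-- ===== PORT A =====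
-- 'for i in range(0, len(T)): val = T[i][c]' ported as structural recursion over T
-- (exact: i is used only as T[i]); T[i][c] as pyGetD (total form; in range under Pre_).
-- Returns none on the early 'return False', otherwise the final sum.
def pvLoopA (c : Int) : List (List Int) → Int → Bool → Bool → Option Int
  | [], s, _, _ => some s
  | row :: t, s, ini, aca =>
    let val := PySem.List.pyGetD row c 0
    if val = 0 ∧ ini = true then pvLoopA c t s ini true
    else if val = 1 ∧ aca = true then none
    else if val = 1 then pvLoopA c t (s + val) true aca
    else pvLoopA c t s ini aca

def ComprobarCol (T : List (List Int)) (c : Int) (data : List (String × List Int)) : Bool :=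
  match pvLoopA c T 0 false false with
  | none => false
  | some s =>
    match pvColsAt c data with
    | some tgt => s == tgt
    | none => false

-- ===== PORT B =====
-- 'if not runs or runs[-1] != v: runs.append(v)' — the guard is exact as a getLast? test:
-- runs[-1] exists iff runs is nonempty, and getLast? = none ≠ some v on the empty list.
def pvRunsStep (runs : List Int) (v : Int) : List Int :=
  if runs.getLast? ≠ some v then runs ++ [v] else runs

def ComprobarCol_alt (T : List (List Int)) (c : Int) (data : List (String × List Int)) : Bool :=
  let col := T.map (fun row => PySem.List.pyGetD row c 0)
  let filtered := col.filter (fun v => v == 0 || v == 1)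
  let runs := filtered.foldl pvRunsStep []
  if PySem.List.count runs 1 > 1 then false
  else
    match pvColsAt c data with
    | some tgt => PySem.List.count filtered 1 == tgt
    | none => false

-- ===== PRECONDITION & SPEC =====
-- Pre_: every row indexable at c, and data["cols"][c] exists. Slightly narrower than A's
-- domain: A also returns (False) without touching data["cols"][c] when the column already
-- has two separated 1-blocks; B returns False there too (see cites).
def Pre_ComprobarCol (T : List (List Int)) (c : Int) (data : List (String × List Int)) : Prop :=
  (∀ row ∈ T, PySem.Raise.InRange row.length c) ∧
  ((PySem.Dict.mk data).get? "cols").isSome = true ∧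
  PySem.Raise.InRange (((PySem.Dict.mk data).get? "cols").getD []).length c

instance (T : List (List Int)) (c : Int) (data : List (String × List Int)) : Decidable (Pre_ComprobarCol T c data) := by unfold Pre_ComprobarCol; infer_instance

def pvWitness_ComprobarCol : List (List Int) × Int × (List (String × List Int)) :=
  ([[1], [0]], 0, [("cols", [1])])

def Spec_ComprobarCol (T : List (List Int)) (c : Int) (data : List (String × List Int)) (out : Bool) : Prop := out = ComprobarCol_alt T c data
instance (T : List (List Int)) (c : Int) (data : List (String × List Int)) (out : Bool) : Decidable (Spec_ComprobarCol T c data out) := by unfold Spec_ComprobarCol; infer_instance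

-- ===== CLAIM (what is proved, stated in full; the proofs are below) =====
def Claim_equal_ComprobarCol : Prop := ∀ (T : List (List Int)) (c : Int) (data : List (String × List Int)), Dom_ComprobarCol T c data → Pre_ComprobarCol T c data → Spec_ComprobarCol T c data (ComprobarCol T c data)

-- ===== LEMMAS AND PROOFS =====

-- number of runs of 1s in a list, given whether the previous element was 1
def pvNruns : List Int → Bool → Nat
  | [], _ => 0
  | v :: t, p => (if v = 1 ∧ p = false then 1 else 0) + pvNruns t (v == 1)

theorem pvNruns_cons (v : Int) (t : List Int) (p : Bool) :
    pvNruns (v :: t) p = (if v = 1 ∧ p = false then 1 else 0) + pvNruns t (v == 1) := rfl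

theorem pvRunsStep_getLast? (runs : List Int) (v : Int) :
    (pvRunsStep runs v).getLast? = some v := by
  unfold pvRunsStep
  split
  · exact List.getLast?_concat
  · simp_all

theorem pvNruns_pos_iff (t : List Int) : 1 ≤ pvNruns t false ↔ (1 : Int) ∈ t := by
  induction t with
  | nil => simp [pvNruns]
  | cons v t ih =>
    by_cases hv : v = 1
    · subst hv; simp [pvNruns_cons]
    · have hb : (v == 1) = false := by simp [hv]
      simp [pvNruns_cons, hv, hb, ih, eq_comm]

-- count of 1s in the collapsed run list built by the foldl
theorem pvCount_foldl (fs : List Int) :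
    ∀ acc : List Int,
      (fs.foldl pvRunsStep acc).count 1 = acc.count 1 + pvNruns fs (acc.getLast? == some 1) := by
  induction fs with
  | nil => intro acc; simp [pvNruns]
  | cons v t ih =>
    intro acc
    rw [List.foldl_cons, ih (pvRunsStep acc v), pvRunsStep_getLast?, pvNruns_cons]
    unfold pvRunsStep
    by_cases hv : v = 1
    · subst hv
      by_cases h1 : acc.getLast? = some 1
      · simp [h1]
      · simp [h1, List.count_append]
        omega
    · have hb : (v == 1) = false := by simp [hv]
      split <;> simp [List.count_append, hv, hb]

-- characterization of A's loop in the three reachable states,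
-- in terms of the filtered value list fs
theorem pvLoopA_char (c : Int) (T : List (List Int)) :
    ∀ s : Int,
      (pvLoopA c T s true true =
        (if (1:Int) ∈ (T.map (fun row => PySem.List.pyGetD row c 0)).filter (fun v => v == 0 || v == 1) then none else some s)) ∧
      (pvLoopA c T s true false =
        (if 1 ≤ pvNruns ((T.map (fun row => PySem.List.pyGetD row c 0)).filter (fun v => v == 0 || v == 1)) true then none
         else some (s + (((T.map (fun row => PySem.List.pyGetD row c 0)).filter (fun v => v == 0 || v == 1)).count 1 : Int)))) ∧
      (pvLoopA c T s false false =
        (if 2 ≤ pvNruns ((T.map (fun row => PySem.List.pyGetD row c 0)).filter (fun v => v == 0 || v == 1)) false then none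
         else some (s + (((T.map (fun row => PySem.List.pyGetD row c 0)).filter (fun v => v == 0 || v == 1)).count 1 : Int)))) := by
  induction T with
  | nil => intro s; simp [pvLoopA, pvNruns]
  | cons row t ih =>
    intro s
    set fs := (t.map (fun r => PySem.List.pyGetD r c 0)).filter (fun v => v == 0 || v == 1) with hfsd
    by_cases h0 : PySem.List.pyGetD row c 0 = 0
    · -- val = 0 : the filtered list gains a leading 0
      have hfs : ((row :: t).map (fun r => PySem.List.pyGetD r c 0)).filter (fun v => v == 0 || v == 1)
          = 0 :: fs := by
        simp [hfsd, h0]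
      refine ⟨?_, ?_, ?_⟩
      · simp only [pvLoopA, h0, hfs]
        simp [(ih s).1]
      · simp only [pvLoopA, h0, hfs]
        rw [(ih s).1, pvNruns_cons]
        norm_num
        by_cases hm : (1:Int) ∈ fs
        · simp [hm, (pvNruns_pos_iff _).mpr hm]
        · have hz : pvNruns fs false = 0 := by
            have := (pvNruns_pos_iff fs).not.mpr hm
            omega
          have hc : fs.count 1 = 0 := List.count_eq_zero.mpr hm
          simp [hm, hz, hc]
      · simp only [pvLoopA, h0, hfs]
        rw [(ih s).2.2, pvNruns_cons, show ((0:Int) == 1) = false by decide]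
        norm_num
    · by_cases h1 : PySem.List.pyGetD row c 0 = 1
      · -- val = 1 : the filtered list gains a leading 1
        have hfs : ((row :: t).map (fun r => PySem.List.pyGetD r c 0)).filter (fun v => v == 0 || v == 1)
            = 1 :: fs := by
          simp [hfsd, h1]
        refine ⟨?_, ?_, ?_⟩
        · simp only [pvLoopA, h1, hfs]
          simp
        · simp only [pvLoopA, h1, hfs]
          rw [(ih (s + 1)).2.1, pvNruns_cons]
          simp only [List.count_cons]
          norm_num
          split
          · rfl
          · simp only [Option.some.injEq]
            ring
        · simp only [pvLoopA, h1, hfs]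
          rw [(ih (s + 1)).2.1, pvNruns_cons]
          simp only [List.count_cons]
          norm_num
          by_cases hn : 1 ≤ pvNruns fs true
          · have h2 : 2 ≤ 1 + pvNruns fs true := by omega
            simp [hn, h2]
          · have h2 : ¬ 2 ≤ 1 + pvNruns fs true := by omega
            simp [hn, h2]
            ring
      · -- val ∉ {0,1}: the row is transparent
        have hfs : ((row :: t).map (fun r => PySem.List.pyGetD r c 0)).filter (fun v => v == 0 || v == 1)
            = fs := by
          simp [hfsd, h0, h1]
        refine ⟨?_, ?_, ?_⟩
        · simp only [pvLoopA, h0, h1, hfs]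
          simp [(ih s).1]
        · simp only [pvLoopA, h0, h1, hfs]
          simp [(ih s).2.1]
        · simp only [pvLoopA, h0, h1, hfs]
          simp [(ih s).2.2]

-- ===== VERDICT (by name: the statement is the Claim_ definition above) =====
theorem ComprobarCol_spec : Claim_equal_ComprobarCol := by
  intro T c data _ _
  simp only [Spec_ComprobarCol, ComprobarCol, ComprobarCol_alt]
  rw [(pvLoopA_char c T 0).2.2]
  simp only [PySem.List.count_eq]
  rw [pvCount_foldl, show ((([]:List Int).getLast?) == some (1:Int)) = false by decide]
  set fs := (T.map (fun row => PySem.List.pyGetD row c 0)).filter (fun v => v == 0 || v == 1) with hfsd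
  simp only [List.count_nil, Nat.zero_add]
  by_cases h2 : 2 ≤ pvNruns fs false
  · simp [h2, show 1 < pvNruns fs false by omega]
  · simp [h2, show ¬ 1 < pvNruns fs false by omega]
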